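-- pv_equiv track=rewrite | github.com/ccfy2223/- | wave_predict_core/data_prep/download_8_typical_ndbc.py | choose_station
-- ===== SOURCE A (Python) =====
-- from typing import Dict, Iterable, List
--
-- def choose_station(candidates: Iterable[str], available: Dict[str, List[int]], used: set[str], min_years: int = 10):
--     best = None
--     for station_id in candidates:
--         years = available.get(station_id)
--         if not years or station_id in used:
--             continue
--         candidate = (station_id, years)
--         if len(years) >= min_years:
--             return candidate
--         if best is None or len(years) > len(best[1]):
--             best = candidate
--     return best
-- ===== SOURCE B (Python) =====
-- def choose_station(candidates, available, used, min_years=10):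
--     valid = [(sid, years) for sid in candidates
--              for years in [available.get(sid)]
--              if years and sid not in used]
--     for cand in valid:
--         if len(cand[1]) >= min_years:
--             return cand
--     if not valid:
--         return None
--     return max(valid, key=lambda c: len(c[1]))
-- ===== Notes on version B (the rewrite author's own statement) =====
-- stated objective: simpler
-- what changed: B replaces A's single stateful loop (early return + running-best accumulator) by a pipeline: filter candidates into a `valid` list once, then scan it for the first threshold-meeting pair, else take max(valid, key=len of years), which keeps the first maximum exactly like A's strict-> update.
import Mathlib
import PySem

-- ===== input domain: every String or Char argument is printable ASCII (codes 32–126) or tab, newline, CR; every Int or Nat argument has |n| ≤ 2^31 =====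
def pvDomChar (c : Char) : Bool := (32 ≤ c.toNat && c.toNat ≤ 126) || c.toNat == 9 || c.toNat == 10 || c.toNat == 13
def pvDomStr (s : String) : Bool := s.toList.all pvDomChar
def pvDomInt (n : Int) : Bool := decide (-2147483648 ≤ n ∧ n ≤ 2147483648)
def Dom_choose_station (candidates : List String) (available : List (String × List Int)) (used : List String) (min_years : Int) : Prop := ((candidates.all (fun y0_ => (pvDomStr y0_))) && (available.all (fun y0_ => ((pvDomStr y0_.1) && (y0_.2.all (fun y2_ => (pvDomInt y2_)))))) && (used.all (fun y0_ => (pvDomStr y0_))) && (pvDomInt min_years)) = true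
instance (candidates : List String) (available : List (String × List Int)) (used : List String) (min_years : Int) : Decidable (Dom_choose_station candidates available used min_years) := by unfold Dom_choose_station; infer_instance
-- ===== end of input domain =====

-- B: same result via a filter/find/max pipeline instead of A's stateful loop (simpler decomposition, same cost).
-- ===== PORT A =====
def chooseLoop (available : List (String × List Int)) (used : List String)
    (min_years : Int) : List String → Option (String × List Int) → Option (String × List Int)
  | [], best => best
  | c :: cs, best =>
    match (List.find? (fun p => p.1 == c) available).map (fun p => p.2) with
    | none => chooseLoop available used min_years cs best
    | some years =>
      if years = [] ∨ used.contains c then chooseLoop available used min_years cs best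
      else if (years.length : Int) ≥ min_years then some (c, years)
      else
        match best with
        | none => chooseLoop available used min_years cs (some (c, years))
        | some b =>
          if (years.length : Int) > (b.2.length : Int) then
            chooseLoop available used min_years cs (some (c, years))
          else chooseLoop available used min_years cs best

def choose_station (candidates : List String) (available : List (String × List Int)) (used : List String) (min_years : Int) : Option (String × List Int) :=
  chooseLoop available used min_years candidates none

-- ===== PORT B =====
def validFilter (available : List (String × List Int)) (used : List String)
    (sid : String) : Option (String × List Int) :=
  match (List.find? (fun p => p.1 == sid) available).map (fun p => p.2) with
  | none => none
  | some years => if years ≠ [] ∧ ¬ used.contains sid then some (sid, years) else none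

def choose_station_alt (candidates : List String) (available : List (String × List Int)) (used : List String) (min_years : Int) : Option (String × List Int) :=
  let valid := candidates.filterMap (validFilter available used)
  match valid.find? (fun c => decide ((c.2.length : Int) ≥ min_years)) with
  | some c => some c
  | none =>
    if valid = [] then none
    else PySem.List.max? valid (fun c => (c.2.length : Int))

-- ===== PRECONDITION & SPEC =====
def Spec_choose_station (candidates : List String) (available : List (String × List Int)) (used : List String) (min_years : Int) (out : Option (String × List Int)) : Prop := out = choose_station_alt candidates available used min_years
instance (candidates : List String) (available : List (String × List Int)) (used : List String) (min_years : Int) (out : Option (String × List Int)) : Decidable (Spec_choose_station candidates available used min_years out) := by unfold Spec_choose_station; infer_instance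

-- ===== CLAIM (what is proved, stated in full; the proofs are below) =====
def Claim_equal_choose_station : Prop := ∀ (candidates : List String) (available : List (String × List Int)) (used : List String) (min_years : Int), Dom_choose_station candidates available used min_years → Spec_choose_station candidates available used min_years (choose_station candidates available used min_years)

-- ===== LEMMAS AND PROOFS =====

-- the running-best update of A's loop, written as the fold step of PySem.List.max?
def bestUpd (acc : Option (String × List Int)) (x : String × List Int) : Option (String × List Int) :=
  match acc with
  | none => some x
  | some m => if (m.2.length : Int) < (x.2.length : Int) then some x else some m

theorem chooseLoop_eq (available : List (String × List Int)) (used : List String)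
    (min_years : Int) :
    ∀ (cs : List String) (best : Option (String × List Int)),
      chooseLoop available used min_years cs best =
        match (cs.filterMap (validFilter available used)).find?
            (fun c => decide ((c.2.length : Int) ≥ min_years)) with
        | some c => some c
        | none => (cs.filterMap (validFilter available used)).foldl bestUpd best := by
  intro cs
  induction cs with
  | nil => intro best; rfl
  | cons c cs ih =>
    intro best
    simp only [chooseLoop]
    match h : (List.find? (fun p => p.1 == c) available).map (fun p => p.2) with
    | none =>
      rw [h]
      have hF : validFilter available used c = none := by
        simp only [validFilter, h]
      simp only [List.filterMap_cons, hF]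
      exact ih best
    | some years =>
      rw [h]
      by_cases hskip : years = [] ∨ used.contains c
      · have hF : validFilter available used c = none := by
          unfold validFilter; rw [h]
          exact if_neg (by tauto)
        simp only [if_pos hskip, List.filterMap_cons, hF]
        exact ih best
      · have hk : years ≠ [] ∧ ¬ used.contains c = true := by tauto
        have hF : validFilter available used c = some (c, years) := by
          unfold validFilter; rw [h]
          exact if_pos hk
        simp only [if_neg hskip, List.filterMap_cons, hF, List.find?_cons, List.foldl_cons]
        by_cases hth : (years.length : Int) ≥ min_years
        · have hd : (decide (((c, years).2.length : Int) ≥ min_years)) = true :=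
            decide_eq_true hth
          simp only [hd, if_pos hth]
        · have hd : (decide (((c, years).2.length : Int) ≥ min_years)) = false := by
            simp [hth]
          simp only [hd, if_neg hth]
          match best with
          | none =>
            have hu : bestUpd none (c, years) = some (c, years) := rfl
            rw [hu]; exact ih _
          | some b =>
            by_cases hgt : (years.length : Int) > (b.2.length : Int)
            · have hu : bestUpd (some b) (c, years) = some (c, years) := by
                simp only [bestUpd]; rw [if_pos hgt]
              simp only [if_pos hgt, hu]
              exact ih _
            · have hu : bestUpd (some b) (c, years) = some b := by
                simp only [bestUpd]
                rw [if_neg hgt]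
              simp only [if_neg hgt, hu]
              exact ih _

theorem foldl_bestUpd_max? (valid : List (String × List Int)) :
    valid.foldl bestUpd none = PySem.List.max? valid (fun c => (c.2.length : Int)) := by
  unfold PySem.List.max?
  congr 1
  funext acc x
  cases acc with
  | none => rfl
  | some m => rfl

-- ===== VERDICT (by name: the statement is the Claim_ definition above) =====
theorem choose_station_spec : Claim_equal_choose_station := by
  intro candidates available used min_years _
  unfold Spec_choose_station choose_station choose_station_alt
  rw [chooseLoop_eq]
  cases hf : (candidates.filterMap (validFilter available used)).find?
      (fun c => decide ((c.2.length : Int) ≥ min_years)) with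
  | some c => simp only [hf]
  | none =>
    simp only [hf]
    by_cases hv : candidates.filterMap (validFilter available used) = []
    · rw [if_pos hv, hv]; rfl
    · rw [if_neg hv, ← foldl_bestUpd_max?]
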